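-- pv_equiv track=rewrite | github.com/rishabhjain02/Data-Structures-And-Algorithms | Queues/Perfect Numbers.py | solve
-- ===== SOURCE A (Python) =====
-- from collections import deque
--
-- def solve(A):
--     count = 2
--     queue = deque(['1', '2'])
--     perfect_list = ['1', '2']
--
--     while count < A:
--         temp = queue.popleft()
--         queue.append(temp + '1')
--         queue.append(temp + '2')
--         perfect_list.append(temp + '1')
--         perfect_list.append(temp + '2')
--         count += 2
--
--     value = perfect_list[A-1]
--     perfect_number = value + value[::-1]
--     return perfect_number
-- ===== SOURCE B (Python) =====
-- def solve(A):
--     # A-th string over digits {1,2} in BFS order = bijective base-2 numeral of A; palindrome it.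
--     if A < 1:
--         raise ValueError("rank must be a positive integer")
--     s = ''
--     n = A
--     while n > 0:
--         n, r = divmod(n - 1, 2)
--         s = ('1' if r == 0 else '2') + s
--     return s + s[::-1]
-- ===== Notes on version B (the rewrite author's own statement) =====
-- stated objective: faster
-- what changed: Instead of growing a BFS queue and a list of all A strings and indexing, B computes the A-th {1,2}-string directly as the bijective base-2 numeral of A by repeated division.
-- outside the precondition, e.g. on solve(0): A returns '22', B raises ValueError; on solve(-1): A returns '11', B raises ValueError
import Mathlib
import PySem

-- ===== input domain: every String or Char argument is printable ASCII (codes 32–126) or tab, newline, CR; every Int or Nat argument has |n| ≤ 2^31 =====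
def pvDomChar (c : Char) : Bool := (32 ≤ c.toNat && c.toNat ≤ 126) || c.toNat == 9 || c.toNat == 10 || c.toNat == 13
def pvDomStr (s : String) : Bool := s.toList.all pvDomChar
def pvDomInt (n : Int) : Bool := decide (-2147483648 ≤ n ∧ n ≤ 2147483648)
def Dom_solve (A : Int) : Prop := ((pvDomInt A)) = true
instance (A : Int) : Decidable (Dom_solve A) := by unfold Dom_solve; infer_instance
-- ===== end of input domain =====

-- B replaces A's BFS queue + full list of A strings by direct computation of the A-th
-- {1,2}-string as the bijective base-2 numeral of A (objective: faster, asymptotic).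

-- ===== PORT A =====
-- The while loop, fuel-encoded structurally; fuel A.toNat always dominates the number of
-- iterations (count starts at 2 and grows by 2 while count < A), so the guard `count < A`
-- alone decides termination, exactly as in Python.
def solveLoop : Nat → Int → Int → List String → List String → List String
  | 0, _, _, _, perfect => perfect
  | fuel + 1, A, count, queue, perfect =>
    if count < A then
      match queue with
      | [] => perfect   -- unreachable: the queue always holds at least two elements
      | temp :: rest =>
          solveLoop fuel A (count + 2) (rest ++ [temp ++ "1", temp ++ "2"])
            (perfect ++ [temp ++ "1", temp ++ "2"])
    else perfect

def solve (A : Int) : String :=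
  let perfect := solveLoop A.toNat A 2 ["1", "2"] ["1", "2"]
  match PySem.List.pyGet? perfect (A - 1) with
  | some value => value ++ (PySem.Str.slice? value none none (-1)).getD ""
  | none => ""   -- Python raises IndexError here (A ≤ -2); excluded by Pre_solve

-- ===== PORT B =====
-- Source B's while loop, fuel-encoded structurally (n strictly decreases while 0 < n,
-- so fuel A.toNat suffices and the guard `0 < n` alone decides termination).
def altLoop : Nat → Int → String → String
  | 0, _, s => s
  | fuel + 1, n, s =>
    if 0 < n then
      altLoop fuel (PySem.Int.floordiv (n - 1) 2)
        ((if PySem.Int.mod (n - 1) 2 = 0 then "1" else "2") ++ s)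
    else s

def solve_alt (A : Int) : String :=
  if A < 1 then ""   -- Python raises ValueError here; excluded by Pre_solve
  else
    let s := altLoop A.toNat A ""
    s ++ (PySem.Str.slice? s none none (-1)).getD ""

-- ===== PRECONDITION & SPEC =====
-- Pre_ excludes exactly A ≤ 0: for A ≤ -2 Python's perfect_list[A-1] raises IndexError,
-- and for A ∈ {-1, 0} A's negative index wraps around, accidentally returning '11' / '22',
-- while B's natural validation of the 1-indexed rank raises ValueError on these inputs.
def Pre_solve (A : Int) : Prop := 1 ≤ A
instance (A : Int) : Decidable (Pre_solve A) := by unfold Pre_solve; infer_instance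
def pvWitness_solve : Int := (5)

def Spec_solve (A : Int) (out : String) : Prop := out = solve_alt A
instance (A : Int) (out : String) : Decidable (Spec_solve A out) := by unfold Spec_solve; infer_instance

-- ===== CLAIM (what is proved, stated in full; the proofs are below) =====
def Claim_equal_solve : Prop := ∀ (A : Int), Dom_solve A → Pre_solve A → Spec_solve A (solve A)

-- ===== LEMMAS AND PROOFS =====

-- The n-th {1,2}-string in BFS order (1-indexed): the bijective base-2 numeral of n.
def rep : Nat → List Char
  | 0 => []
  | n + 1 => rep (n / 2) ++ [if n % 2 = 0 then '1' else '2']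
decreasing_by omega

def repS (n : Nat) : String := String.ofList (rep n)

lemma rep_succ (n : Nat) : rep (n + 1) = rep (n / 2) ++ [if n % 2 = 0 then '1' else '2'] := by
  rw [rep]

lemma repS_append_one (k : Nat) : repS (k + 1) ++ "1" = repS (2 * k + 3) := by
  apply String.toList_inj.mp
  rw [show 2 * k + 3 = (2 * k + 2) + 1 from by omega]
  simp only [repS, rep_succ, String.toList_append, String.toList_ofList]
  rw [show (2 * k + 2) / 2 = k + 1 from by omega, show (2 * k + 2) % 2 = 0 from by omega]
  simp [rep_succ]

lemma repS_append_two (k : Nat) : repS (k + 1) ++ "2" = repS (2 * k + 4) := by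
  apply String.toList_inj.mp
  rw [show 2 * k + 4 = (2 * k + 3) + 1 from by omega]
  simp only [repS, rep_succ, String.toList_append, String.toList_ofList]
  rw [show (2 * k + 3) / 2 = k + 1 from by omega, show (2 * k + 3) % 2 = 1 from by omega]
  simp [rep_succ]

lemma solveLoop_inv (A : Int) : ∀ (fuel k : Nat), A ≤ 2 + 2 * k + 2 * fuel →
    ∃ m : Nat, k ≤ m ∧ A ≤ 2 + 2 * (m : Int) ∧
      solveLoop fuel A (2 + 2 * k) ((List.range' (k + 1) (k + 2)).map repS)
        ((List.range' 1 (2 * k + 2)).map repS)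
      = (List.range' 1 (2 * m + 2)).map repS := by
  intro fuel
  induction fuel with
  | zero =>
    intro k h
    exact ⟨k, le_refl _, by push_cast at h ⊢; omega, rfl⟩
  | succ fuel ih =>
    intro k h
    by_cases hc : (2 + 2 * (k : Int)) < A
    · have hq : (List.range' (k + 1) (k + 2)).map repS
          = repS (k + 1) :: (List.range' (k + 2) (k + 1)).map repS := by
        rw [List.range'_succ]; simp
      have h1 := repS_append_one k
      have h2 := repS_append_two k
      have hred : solveLoop (fuel + 1) A (2 + 2 * (k : Int))
            (repS (k + 1) :: (List.range' (k + 2) (k + 1)).map repS)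
            ((List.range' 1 (2 * k + 2)).map repS)
          = solveLoop fuel A (2 + 2 * (k : Int) + 2)
            ((List.range' (k + 2) (k + 1)).map repS ++ [repS (k + 1) ++ "1", repS (k + 1) ++ "2"])
            ((List.range' 1 (2 * k + 2)).map repS ++ [repS (k + 1) ++ "1", repS (k + 1) ++ "2"]) := by
        simp only [solveLoop]
        rw [if_pos hc]
      rw [hq, hred]
      have hq' : (List.range' (k + 2) (k + 1)).map repS
            ++ [repS (k + 1) ++ "1", repS (k + 1) ++ "2"]
          = (List.range' (k + 2) (k + 3)).map repS := by
        rw [h1, h2]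
        have hr : List.range' (k + 2) (k + 3) = List.range' (k + 2) (k + 1) ++ [2 * k + 3, 2 * k + 4] := by
          rw [show k + 3 = (k + 1) + 1 + 1 from by omega, List.range'_1_concat,
            List.range'_1_concat]
          simp
          omega
        rw [hr]; simp
      have hp' : (List.range' 1 (2 * k + 2)).map repS
            ++ [repS (k + 1) ++ "1", repS (k + 1) ++ "2"]
          = (List.range' 1 (2 * (k + 1) + 2)).map repS := by
        rw [h1, h2]
        have hr : List.range' 1 (2 * (k + 1) + 2) = List.range' 1 (2 * k + 2) ++ [2 * k + 3, 2 * k + 4] := by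
          rw [show 2 * (k + 1) + 2 = (2 * k + 2) + 1 + 1 from by omega, List.range'_1_concat,
            List.range'_1_concat]
          simp
          omega
        rw [hr]; simp
      rw [hq', hp',
        show (2 : Int) + 2 * (k : Int) + 2 = 2 + 2 * ((k + 1 : Nat) : Int) from by push_cast; ring]
      have hA : A ≤ 2 + 2 * ((k + 1 : Nat) : Int) + 2 * fuel := by push_cast at h ⊢; omega
      obtain ⟨m, hm1, hm2, hm3⟩ := ih (k + 1) hA
      exact ⟨m, by omega, hm2, by rw [← hm3]⟩
    · simp only [solveLoop]
      rw [if_neg hc]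
      exact ⟨k, le_refl _, by omega, rfl⟩

lemma altLoop_eq : ∀ (fuel : Nat) (n : Int) (s : String), 0 ≤ n → n.toNat ≤ fuel →
    (altLoop fuel n s).toList = rep n.toNat ++ s.toList := by
  intro fuel
  induction fuel with
  | zero =>
    intro n s h0 hf
    have hn0 : n = 0 := by omega
    subst hn0
    simp [altLoop, rep]
  | succ fuel ih =>
    intro n s h0 hf
    by_cases hn : 0 < n
    · simp only [altLoop]
      rw [if_pos hn]
      have hd : PySem.Int.floordiv (n - 1) 2 = (n - 1) / 2 :=
        PySem.Int.floordiv_eq_ediv_of_pos (by omega)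
      have hm : PySem.Int.mod (n - 1) 2 = (n - 1) % 2 :=
        PySem.Int.mod_eq_emod_of_pos (by omega)
      rw [hd, hm]
      have hnn : ((n - 1) / 2).toNat = (n.toNat - 1) / 2 := by omega
      rw [ih _ _ (by omega) (by omega)]
      obtain ⟨m', hm'⟩ : ∃ m', n.toNat = m' + 1 := ⟨n.toNat - 1, by omega⟩
      simp only [hnn, hm', Nat.add_sub_cancel, rep_succ]
      have hmod : ((n - 1) % 2 = 0) ↔ (m' % 2 = 0) := by omega
      by_cases hz : m' % 2 = 0
      · rw [if_pos (hmod.mpr hz), if_pos hz]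
        simp [String.toList_append]
      · rw [if_neg (fun h => hz (hmod.mp h)), if_neg hz]
        simp [String.toList_append]
    · simp only [altLoop]
      rw [if_neg hn]
      have hn0 : n = 0 := by omega
      subst hn0
      simp [rep]

lemma solve_alt_eq (A : Int) (h : 1 ≤ A) :
    (solve_alt A).toList = rep A.toNat ++ (rep A.toNat).reverse := by
  have hs := altLoop_eq A.toNat A "" (by omega) (le_refl _)
  simp only [solve_alt]
  rw [if_neg (by omega)]
  rw [PySem.Str.slice?_none_none_neg_one]
  simp [String.toList_append, hs]

lemma solve_eq (A : Int) (h : 1 ≤ A) :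
    (solve A).toList = rep A.toNat ++ (rep A.toNat).reverse := by
  have hfuel : A ≤ 2 + 2 * ((0 : Nat) : Int) + 2 * (A.toNat : Int) := by omega
  obtain ⟨m, _, hm2, hm3⟩ := solveLoop_inv A A.toNat 0 hfuel
  have hr1 : rep 1 = ['1'] := by
    rw [show (1 : Nat) = 0 + 1 from rfl, rep_succ]; simp [rep]
  have hr2 : rep 2 = ['2'] := by
    rw [show (2 : Nat) = 1 + 1 from rfl, rep_succ]; simp [rep]
  have h0q : ((List.range' (0 + 1) (0 + 2)).map repS : List String) = ["1", "2"] := by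
    rw [show List.range' (0 + 1) (0 + 2) = [1, 2] from by decide]
    simp only [List.map_cons, List.map_nil]
    rw [show repS 1 = "1" from String.toList_inj.mp (by simp [repS, hr1]),
      show repS 2 = "2" from String.toList_inj.mp (by simp [repS, hr2])]
  rw [show (2 : Int) + 2 * ((0 : Nat) : Int) = 2 from by norm_num, h0q] at hm3
  have hinit : solve A = match PySem.List.pyGet?
      (solveLoop A.toNat A 2 ["1", "2"] ["1", "2"]) (A - 1) with
    | some value => value ++ (PySem.Str.slice? value none none (-1)).getD ""
    | none => "" := rfl
  rw [hinit, hm3]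
  have hlen : ((List.range' 1 (2 * m + 2)).map repS).length = 2 * m + 2 := by simp
  have hidx : (A - 1).toNat < 2 * m + 2 := by omega
  have hget : PySem.List.pyGet? ((List.range' 1 (2 * m + 2)).map repS) (A - 1)
      = some (repS (1 + (A - 1).toNat)) := by
    rw [show (A - 1) = ((A - 1).toNat : Int) from by omega, PySem.List.pyGet?_natCast]
    rw [List.getElem?_eq_getElem (by simpa using hidx)]
    simp
  rw [hget, show 1 + (A - 1).toNat = A.toNat from by omega]
  simp only []
  rw [PySem.Str.slice?_none_none_neg_one]
  simp [repS, String.toList_append]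

-- ===== VERDICT (by name: the statement is the Claim_ definition above) =====
theorem solve_spec : Claim_equal_solve := by
  intro A _ hpre
  have h1 : 1 ≤ A := hpre
  apply String.toList_inj.mp
  rw [solve_eq A h1, solve_alt_eq A h1]
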